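-- pv_equiv track=rewrite | github.com/andrewcharlwood/HighCostDrugsPathways | data_processing/diagnosis_lookup.py | get_search_terms_for_drug
-- ===== SOURCE A (Python) =====
-- def get_search_terms_for_drug(
--     drug_name: str,
--     search_term_to_fragments: dict[str, list[str]],
-- ) -> list[str]:
--     """
--     Get all Search_Terms that list a given drug using substring matching.
--
--     Checks if any drug fragment from DimSearchTerm is a SUBSTRING of the given
--     drug name (case-insensitive). This handles both exact matches (ADALIMUMAB)
--     and partial fragments (PEGYLATED, INHALED).
--
--     Args:
--         drug_name: HCD drug name (e.g., "ADALIMUMAB 40MG", "PEGYLATED LIPOSOMAL DOXORUBICIN")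
--         search_term_to_fragments: Mapping of search_term -> list of drug fragments
--
--     Returns:
--         List of Search_Terms whose drug fragments match the drug name
--     """
--     drug_name_upper = drug_name.upper()
--     matched_terms: list[str] = []
--
--     for search_term, fragments in search_term_to_fragments.items():
--         for frag in fragments:
--             if frag in drug_name_upper:
--                 matched_terms.append(search_term)
--                 break  # One matching fragment is enough for this Search_Term
--
--     return matched_terms
-- ===== SOURCE B (Python) =====
-- def get_search_terms_for_drug(
--     drug_name: str,
--     search_term_to_fragments: dict[str, list[str]],
-- ) -> list[str]:
--     """Index-based re-implementation: collect the distinct fragment lengths, build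
--     one set of all substrings of the upper-cased drug name having those lengths,
--     then each fragment test is a single hash lookup instead of a substring scan."""
--     u = drug_name.upper()
--     n = len(u)
--     lengths = {len(f) for frags in search_term_to_fragments.values() for f in frags}
--     subs = {u[i:i + L] for L in lengths for i in range(n - L + 1)}
--     return [term for term, frags in search_term_to_fragments.items()
--             if any(f in subs for f in frags)]
-- ===== Notes on version B (the rewrite author's own statement) =====
-- stated objective: faster
-- what changed: B collects the distinct fragment lengths, builds once a hash set of all substrings of the upper-cased drug name having those lengths, and replaces A's per-fragment substring scan over the drug name with a single set lookup per fragment, producing the result as a filter+map over the dict items instead of an append-with-break loop.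
import Mathlib
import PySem

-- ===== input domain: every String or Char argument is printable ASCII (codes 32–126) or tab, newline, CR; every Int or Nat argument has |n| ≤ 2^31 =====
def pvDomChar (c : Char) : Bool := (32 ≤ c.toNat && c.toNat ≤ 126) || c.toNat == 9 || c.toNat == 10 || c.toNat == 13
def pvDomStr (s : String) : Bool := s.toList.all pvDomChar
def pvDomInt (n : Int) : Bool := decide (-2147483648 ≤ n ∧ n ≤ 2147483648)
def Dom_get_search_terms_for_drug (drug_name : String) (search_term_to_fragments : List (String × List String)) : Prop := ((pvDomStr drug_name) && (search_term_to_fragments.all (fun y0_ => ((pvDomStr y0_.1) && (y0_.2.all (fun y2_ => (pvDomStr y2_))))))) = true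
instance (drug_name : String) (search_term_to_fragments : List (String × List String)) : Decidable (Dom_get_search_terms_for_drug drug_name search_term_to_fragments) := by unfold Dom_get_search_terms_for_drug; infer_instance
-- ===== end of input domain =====

-- B builds, once, a set of all substrings of the upper-cased drug name having the lengths that
-- occur among the fragments, so each fragment test is one set lookup instead of a substring scan (objective: faster, as measured).

-- ===== PORT A =====
-- inner 'for frag in fragments: if frag in drug_name_upper: … break' — first match wins
def pvFragMatch (u : String) : List String → Bool
  | [] => false
  | f :: rest => if PySem.Str.isIn f u then true else pvFragMatch u rest

def get_search_terms_for_drug (drug_name : String) (search_term_to_fragments : List (String × List String)) : List String :=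
  let u := PySem.Str.upper drug_name
  search_term_to_fragments.foldl
    (fun acc p => if pvFragMatch u p.2 then acc ++ [p.1] else acc) []

-- ===== PORT B =====
-- "lengths = {len(f) for frags in d.values() for f in frags}"
def pvFragLens (stf : List (String × List String)) : PySem.Set Int :=
  stf.foldl (fun s p => p.2.foldl (fun s f => PySem.Set.add s (PySem.Str.len f)) s)
    PySem.Set.empty

-- "subs = {u[i:i+L] for L in lengths for i in range(n - L + 1)}"
def pvSubsOfLens (u : String) (lens : List Int) : PySem.Set String :=
  lens.foldl
    (fun s L =>
      (PySem.List.pyRange 0 (PySem.Str.len u - L + 1)).foldl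
        (fun s i => PySem.Set.add s (PySem.Str.slice u (some i) (some (i + L)))) s)
    PySem.Set.empty

def get_search_terms_for_drug_alt (drug_name : String) (search_term_to_fragments : List (String × List String)) : List String :=
  let u := PySem.Str.upper drug_name
  let subs := pvSubsOfLens u (pvFragLens search_term_to_fragments)
  (search_term_to_fragments.filter
      (fun p => p.2.any (fun f => PySem.Set.contains subs f))).map Prod.fst

-- ===== PRECONDITION & SPEC =====
def Spec_get_search_terms_for_drug (drug_name : String) (search_term_to_fragments : List (String × List String)) (out : List String) : Prop := out = get_search_terms_for_drug_alt drug_name search_term_to_fragments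
instance (drug_name : String) (search_term_to_fragments : List (String × List String)) (out : List String) : Decidable (Spec_get_search_terms_for_drug drug_name search_term_to_fragments out) := by unfold Spec_get_search_terms_for_drug; infer_instance

-- ===== CLAIM (what is proved, stated in full; the proofs are below) =====
def Claim_equal_get_search_terms_for_drug : Prop := ∀ (drug_name : String) (search_term_to_fragments : List (String × List String)), Dom_get_search_terms_for_drug drug_name search_term_to_fragments → Spec_get_search_terms_for_drug drug_name search_term_to_fragments (get_search_terms_for_drug drug_name search_term_to_fragments)

-- ===== LEMMAS AND PROOFS =====

-- A's inner loop is an 'any' over the fragments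
theorem pvFragMatch_eq_any (u : String) (l : List String) :
    pvFragMatch u l = l.any (fun f => PySem.Str.isIn f u) := by
  induction l with
  | nil => rfl
  | cons f rest ih =>
    simp only [pvFragMatch, List.any_cons, ih]
    cases hf : PySem.Str.isIn f u <;> simp_all

-- membership in a doubly nested set-building loop
theorem mem_foldl_foldl_add {β γ α : Type} [BEq α] [LawfulBEq α]
    (L : List β) (g : β → List γ) (f : β → γ → α) (s : PySem.Set α) (y : α) :
    y ∈ L.foldl (fun s b => (g b).foldl (fun s c => PySem.Set.add s (f b c)) s) s
    ↔ y ∈ s ∨ ∃ b ∈ L, ∃ c ∈ g b, y = f b c := by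
  induction L generalizing s with
  | nil => simp
  | cons b rest ih =>
    rw [List.foldl_cons, ih, PySem.Set.mem_foldl_add]
    constructor
    · rintro (⟨h | ⟨c, hc, hy⟩⟩ | ⟨b', hb', c, hc, hy⟩)
      · exact Or.inl h
      · exact Or.inr ⟨b, List.mem_cons_self, c, hc, hy⟩
      · exact Or.inr ⟨b', List.mem_cons_of_mem _ hb', c, hc, hy⟩
    · rintro (h | ⟨b', hb', c, hc, hy⟩)
      · exact Or.inl (Or.inl h)
      · rcases List.mem_cons.mp hb' with rfl | hb'
        · exact Or.inl (Or.inr ⟨c, hc, hy⟩)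
        · exact Or.inr ⟨b', hb', c, hc, hy⟩

theorem mem_pvFragLens (stf : List (String × List String)) (x : Int) :
    x ∈ pvFragLens stf ↔ ∃ p ∈ stf, ∃ f ∈ p.2, x = PySem.Str.len f := by
  unfold pvFragLens
  rw [mem_foldl_foldl_add]
  simp [PySem.Set.empty]

-- for a fragment whose length is indexed, the set lookup is exactly the substring test
theorem mem_pvSubsOfLens (u : String) (lens : List Int) (f : String)
    (hnn : ∀ L ∈ lens, 0 ≤ L) (hmem : PySem.Str.len f ∈ lens) :
    f ∈ pvSubsOfLens u lens ↔ f.toList <:+: u.toList := by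
  unfold pvSubsOfLens
  rw [mem_foldl_foldl_add]
  constructor
  · rintro (h | ⟨L, hL, i, hi, rfl⟩)
    · simp [PySem.Set.empty] at h
    · rw [PySem.List.mem_pyRange_one] at hi
      have hiL : 0 ≤ i + L := by have := hnn L hL; omega
      rw [PySem.Str.toList_slice, PySem.Chars.slice, PySem.List.slice_toNat _ hi.1 hiL]
      exact (List.take_prefix _ _).isInfix.trans (List.drop_suffix _ _).isInfix
  · rintro ⟨pre, suf, h⟩
    have hlen : pre.length + f.toList.length + suf.length = u.toList.length := by
      rw [← h]; simp only [List.length_append]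
    refine Or.inr ⟨PySem.Str.len f, hmem, (pre.length : Int), ?_, ?_⟩
    · rw [PySem.List.mem_pyRange_one, PySem.Str.len_eq, PySem.Str.len_eq]
      omega
    · apply String.ext
      have : (pre.length : Int) + PySem.Str.len f
          = (pre.length : Int) + (f.toList.length : Int) := by
        rw [PySem.Str.len_eq]
      rw [PySem.Str.toList_slice, PySem.Chars.slice, this,
        PySem.List.slice_natCast_add, ← h,
        show pre ++ f.toList ++ suf = pre ++ (f.toList ++ suf) by simp,
        List.drop_left, List.take_left]

-- ===== VERDICT (by name: the statement is the Claim_ definition above) =====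
theorem get_search_terms_for_drug_spec : Claim_equal_get_search_terms_for_drug := by
  intro drug_name stf _
  unfold Spec_get_search_terms_for_drug get_search_terms_for_drug get_search_terms_for_drug_alt
  rw [PySem.List.foldl_append_if]
  simp only [List.nil_append]
  congr 1
  apply List.filter_congr
  intro p hp
  rw [pvFragMatch_eq_any]
  apply PySem.List.any_congr_mem
  intro f hf
  rw [Bool.eq_iff_iff, PySem.Str.isIn_iff_infix, PySem.Set.contains_iff]
  refine (mem_pvSubsOfLens _ _ _ ?_ ((mem_pvFragLens stf _).mpr ⟨p, hp, f, hf, rfl⟩)).symm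
  intro L hL
  rcases (mem_pvFragLens stf L).mp hL with ⟨q, _, g, _, rfl⟩
  rw [PySem.Str.len_eq]
  positivity
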